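-- pv_equiv track=rewrite | github.com/deok2kim/algorithm | 프로그래머스/Summer Winter Coding(2018)/숫자 게임.py | solution
-- ===== SOURCE A (Python) =====
-- def solution(A, B):
--     answer = 0
--
--     A.sort()
--     B.sort()
--     for a in A:
--         if B[-1] <= a:
--             B.remove(B[0])
--         else:
--             for b in B:
--                 if b > a:
--                     B.remove(b)
--                     answer += 1
--                     break
--
--     return answer
-- ===== SOURCE B (Python) =====
-- def solution(A, B):
--     sa = sorted(A)
--     sb = sorted(B)
--     j = 0
--     ans = 0
--     for b in sb:
--         if j < len(sa) and b > sa[j]: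
--             ans += 1
--             j += 1
--     return ans
-- ===== Notes on version B (the rewrite author's own statement) =====
-- stated objective: faster
-- what changed: Replaces the per-element scan-and-remove over a shrinking B list with a single two-pointer sweep over both sorted lists.
import Mathlib
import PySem

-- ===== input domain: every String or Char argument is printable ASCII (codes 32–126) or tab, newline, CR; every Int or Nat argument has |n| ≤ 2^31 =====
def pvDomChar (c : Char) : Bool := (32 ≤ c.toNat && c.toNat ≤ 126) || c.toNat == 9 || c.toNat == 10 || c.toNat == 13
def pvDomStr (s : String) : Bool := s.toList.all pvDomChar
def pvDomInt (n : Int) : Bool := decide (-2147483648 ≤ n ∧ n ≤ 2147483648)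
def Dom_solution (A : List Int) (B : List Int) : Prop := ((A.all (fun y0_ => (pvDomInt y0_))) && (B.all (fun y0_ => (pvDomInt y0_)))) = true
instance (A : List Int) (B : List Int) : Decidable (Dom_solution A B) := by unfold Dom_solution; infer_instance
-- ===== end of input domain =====

-- B replaces A's quadratic scan-and-remove over a shrinking list by a two-pointer sweep
-- over the two sorted lists (objective: faster). Note: Python A sorts its arguments in
-- place and empties B; the equivalence proved here is about the RETURN value only.

-- ===== PORT A =====
-- inner 'for b in B: if b > a: … break' — the first element greater than a, if any
def findGT (a : Int) : List Int → Option Int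
  | [] => none
  | b :: r => if b > a then some b else findGT a r

def solnLoop : List Int → List Int → Int → Int
  | [], _, ans => ans
  | a :: rest, Bs, ans =>
    match PySem.List.pyGet? Bs (-1) with
    | none => ans               -- B[-1] raises IndexError; excluded by Pre_solution
    | some last =>
      if last ≤ a then
        match PySem.List.pyGet? Bs 0 with
        | none => ans           -- unreachable when B[-1] exists
        | some b0 => solnLoop rest ((PySem.List.remove? Bs b0).getD Bs) ans
      else
        match findGT a Bs with
        | none => solnLoop rest Bs ans
        | some b => solnLoop rest ((PySem.List.remove? Bs b).getD Bs) (ans + 1)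

def solution (A : List Int) (B : List Int) : Int :=
  solnLoop (PySem.List.sorted A (fun x => x) false) (PySem.List.sorted B (fun x => x) false) 0

-- ===== PORT B =====
def altLoop (sa : List Int) : List Int → Int → Int → Int
  | [], _, ans => ans
  | b :: rest, j, ans =>
    if j < (sa.length : Int) then
      match PySem.List.pyGet? sa j with
      | some x => if b > x then altLoop sa rest (j + 1) (ans + 1) else altLoop sa rest j ans
      | none => altLoop sa rest j ans   -- unreachable: j is in range
    else altLoop sa rest j ans

def solution_alt (A : List Int) (B : List Int) : Int :=
  altLoop (PySem.List.sorted A (fun x => x) false) (PySem.List.sorted B (fun x => x) false) 0 0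

-- ===== PRECONDITION & SPEC =====
-- Pre_ excludes exactly the inputs where A raises IndexError (B exhausted before A is).
def Pre_solution (A : List Int) (B : List Int) : Prop := A.length ≤ B.length
instance (A : List Int) (B : List Int) : Decidable (Pre_solution A B) := by unfold Pre_solution; infer_instance
def pvWitness_solution : List Int × List Int := ([3, 1], [2, 4])

def Spec_solution (A : List Int) (B : List Int) (out : Int) : Prop := out = solution_alt A B
instance (A : List Int) (B : List Int) (out : Int) : Decidable (Spec_solution A B out) := by unfold Spec_solution; infer_instance

-- ===== CLAIM (what is proved, stated in full; the proofs are below) =====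
def Claim_equal_solution : Prop := ∀ (A : List Int) (B : List Int), Dom_solution A B → Pre_solution A B → Spec_solution A B (solution A B)

-- ===== LEMMAS AND PROOFS =====

-- common greedy count on two sorted lists, recursion on the second list
def cfn : List Int → List Int → Int
  | _, [] => 0
  | [], _ :: _ => 0
  | a :: A', b :: B' => if b > a then 1 + cfn A' B' else cfn (a :: A') B'

theorem cfn_nil_left : ∀ (Bs : List Int), cfn [] Bs = 0 := by
  intro Bs; cases Bs <;> rfl

theorem cfn_nil_right : ∀ (As : List Int), cfn As [] = 0 := by
  intro As; cases As <;> rfl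

theorem cfn_zero : ∀ (Bs As : List Int), (∀ b ∈ Bs, ∀ x ∈ As, b ≤ x) → cfn As Bs = 0 := by
  intro Bs
  induction Bs with
  | nil => intro As _; cases As <;> rfl
  | cons b B' ih =>
    intro As h
    cases As with
    | nil => exact cfn_nil_left _
    | cons x A'' =>
      have hbx : b ≤ x := h b (by simp) x (by simp)
      have hnb : ¬ b > x := by omega
      simp only [cfn, if_neg hnb]
      exact ih _ (fun b' hb' x' hx' => h b' (by simp [hb']) x' hx')

theorem cfn_skip : ∀ (L As Bs2 : List Int), (∀ x ∈ L, ∀ y ∈ As, x ≤ y) →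
    cfn As (L ++ Bs2) = cfn As Bs2 := by
  intro L
  induction L with
  | nil => intro As Bs2 _; rfl
  | cons x L' ih =>
    intro As Bs2 h
    cases As with
    | nil => rw [cfn_nil_left, cfn_nil_left]
    | cons y A'' =>
      have hxy : x ≤ y := h x (by simp) y (by simp)
      have hnx : ¬ x > y := by omega
      simp only [List.cons_append, cfn, if_neg hnx]
      exact ih _ _ (fun x' hx' y' hy' => h x' (by simp [hx']) y' hy')

theorem findGT_split : ∀ (Bs : List Int) (a b0 : Int), findGT a Bs = some b0 →
    ∃ L R, Bs = L ++ b0 :: R ∧ (∀ x ∈ L, x ≤ a) ∧ a < b0 := by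
  intro Bs
  induction Bs with
  | nil => intro a b0 h; simp [findGT] at h
  | cons b r ih =>
    intro a b0 h
    by_cases hb : b > a
    · simp only [findGT, if_pos hb] at h
      injection h with h
      subst h
      exact ⟨[], r, rfl, by simp, by omega⟩
    · simp only [findGT, if_neg hb] at h
      obtain ⟨L, R, hsplit, hL, hgt⟩ := ih a b0 h
      exact ⟨b :: L, R, by simp [hsplit], by
        intro x hx
        rcases List.mem_cons.mp hx with h1 | h2
        · omega
        · exact hL x h2, hgt⟩

theorem findGT_isSome : ∀ (Bs : List Int) (a b : Int), b ∈ Bs → a < b → (findGT a Bs).isSome := by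
  intro Bs
  induction Bs with
  | nil => intro a b h; simp at h
  | cons x r ih =>
    intro a b hmem hab
    by_cases hx : x > a
    · simp [findGT, if_pos hx]
    · simp only [findGT, if_neg hx]
      rcases List.mem_cons.mp hmem with h1 | h2
      · omega
      · exact ih a b h2 hab

theorem remove?_append_not_mem : ∀ (L : List Int) (b0 : Int) (R : List Int), b0 ∉ L →
    PySem.List.remove? (L ++ b0 :: R) b0 = some (L ++ R) := by
  intro L
  induction L with
  | nil => intro b0 R _; simp
  | cons x L' ih =>
    intro b0 R h
    have hx : x ≠ b0 := fun he => h (by simp [he])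
    rw [List.cons_append, PySem.List.remove?_cons_of_ne (L' ++ b0 :: R) hx,
        ih b0 R (fun hm => h (by simp [hm]))]
    rfl

theorem pairwise_le_getLast : ∀ (l : List Int) (hne : l ≠ []), l.Pairwise (· ≤ ·) →
    ∀ b ∈ l, b ≤ l.getLast hne := by
  intro l
  induction l with
  | nil => intro hne; exact absurd rfl hne
  | cons x t ih =>
    intro _ hp b hb
    cases t with
    | nil => simp at hb; simp [hb]
    | cons y t' =>
      rw [List.getLast_cons (by simp)]
      rcases List.mem_cons.mp hb with h1 | h2
      · have hxl : x ≤ (y :: t').getLast (by simp) :=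
          (List.pairwise_cons.mp hp).1 _ (List.getLast_mem _)
        omega
      · exact ih (by simp) (List.pairwise_cons.mp hp).2 b h2

theorem soln_char : ∀ (As Bs : List Int) (ans : Int),
    As.Pairwise (· ≤ ·) → Bs.Pairwise (· ≤ ·) → As.length ≤ Bs.length →
    solnLoop As Bs ans = ans + cfn As Bs := by
  intro As
  induction As with
  | nil => intro Bs ans _ _ _; rw [cfn_nil_left]; simp [solnLoop]
  | cons a A' ih =>
    intro Bs ans hA hB hlen
    have hBne : Bs ≠ [] := by
      cases Bs
      · simp at hlen
      · simp
    have hlast : PySem.List.pyGet? Bs (-1) = some (Bs.getLast hBne) := by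
      rw [PySem.List.pyGet?_neg_one, List.getLast?_eq_some_getLast]
    have haA' : ∀ y ∈ A', a ≤ y := fun y hy => (List.pairwise_cons.mp hA).1 y hy
    by_cases hle : Bs.getLast hBne ≤ a
    · -- B[-1] <= a : remove B[0]
      cases Bs with
      | nil => exact absurd rfl hBne
      | cons h0 t =>
        have hrm : PySem.List.remove? (h0 :: t) h0 = some t := PySem.List.remove?_cons_self _ _
        simp only [solnLoop, hlast, if_pos hle, PySem.List.pyGet?_zero_cons, hrm, Option.getD_some]
        have hballB : ∀ b ∈ (h0 :: t), b ≤ a := by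
          intro b hb
          have := pairwise_le_getLast (h0 :: t) hBne hB b hb
          omega
        rw [ih t ans (List.pairwise_cons.mp hA).2 (List.pairwise_cons.mp hB).2 (by simp at hlen ⊢; omega)]
        rw [cfn_zero (h0 :: t) (a :: A') (by
          intro b hb x hx
          have hba := hballB b hb
          rcases List.mem_cons.mp hx with h1 | h2
          · omega
          · have := haA' x h2; omega)]
        rw [cfn_zero t A' (by
          intro b hb x hx
          have hba := hballB b (by simp [hb])
          have := haA' x hx; omega)]
    · -- some b in B beats a
      have hsome : (findGT a Bs).isSome :=
        findGT_isSome Bs a (Bs.getLast hBne) (List.getLast_mem hBne) (by omega)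
      obtain ⟨b0, hb0⟩ := Option.isSome_iff_exists.mp hsome
      obtain ⟨L, R, hsplit, hLle, hgt⟩ := findGT_split Bs a b0 hb0
      have hb0L : b0 ∉ L := fun hm => by have := hLle b0 hm; omega
      have hrm : PySem.List.remove? Bs b0 = some (L ++ R) := by
        rw [hsplit]; exact remove?_append_not_mem L b0 R hb0L
      simp only [solnLoop, hlast, if_neg hle, hb0, hrm, Option.getD_some]
      have hLRsub : (L ++ R).Sublist Bs := by
        rw [hsplit]; exact List.Sublist.append_left (List.sublist_cons_self b0 R) L
      have hLRpw : (L ++ R).Pairwise (· ≤ ·) := hB.sublist hLRsub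
      have hLRlen : A'.length ≤ (L ++ R).length := by
        have := hsplit ▸ hlen; simp at this ⊢; omega
      rw [ih (L ++ R) (ans + 1) (List.pairwise_cons.mp hA).2 hLRpw hLRlen]
      rw [hsplit, cfn_skip L (a :: A') (b0 :: R) (by
        intro x hx y hy
        have hxa := hLle x hx
        rcases List.mem_cons.mp hy with h1 | h2
        · omega
        · have := haA' y h2; omega)]
      rw [cfn_skip L A' R (by
        intro x hx y hy
        have hxa := hLle x hx
        have := haA' y hy; omega)]
      simp only [cfn, if_pos (by omega : b0 > a)]
      ring

theorem alt_char : ∀ (sa bs : List Int) (j ans : Int), 0 ≤ j →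
    altLoop sa bs j ans = ans + cfn (sa.drop j.toNat) bs := by
  intro sa bs
  induction bs with
  | nil => intro j ans _; rw [cfn_nil_right]; simp [altLoop]
  | cons b rest ih =>
    intro j ans hj
    by_cases hlt : j < (sa.length : Int)
    · have hjn : j.toNat < sa.length := by omega
      have hget : PySem.List.pyGet? sa j = some sa[j.toNat] :=
        PySem.List.pyGet?_eq_some_getElem sa hj hlt
      have hdrop : sa.drop j.toNat = sa[j.toNat] :: sa.drop (j.toNat + 1) :=
        List.drop_eq_getElem_cons hjn
      by_cases hb : b > sa[j.toNat]
      · simp only [altLoop, if_pos hlt, hget, if_pos hb]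
        rw [ih (j + 1) (ans + 1) (by omega), hdrop]
        simp only [cfn, if_pos hb]
        have : (j + 1).toNat = j.toNat + 1 := by omega
        rw [this]; ring
      · simp only [altLoop, if_pos hlt, hget, if_neg hb]
        rw [ih j ans hj, hdrop]
        simp only [cfn, if_neg hb]
    · have hdrop : sa.drop j.toNat = [] := List.drop_eq_nil_of_le (by omega)
      simp only [altLoop, if_neg hlt]
      rw [ih j ans hj, hdrop, cfn_nil_left]
      cases rest <;> rfl

-- ===== VERDICT (by name: the statement is the Claim_ definition above) =====
theorem solution_spec : Claim_equal_solution := by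
  intro A B _ hpre
  unfold Spec_solution solution solution_alt
  have hApw : (PySem.List.sorted A (fun x => x) false).Pairwise (· ≤ ·) :=
    PySem.List.sorted_pairwise A (fun x => x)
  have hBpw : (PySem.List.sorted B (fun x => x) false).Pairwise (· ≤ ·) :=
    PySem.List.sorted_pairwise B (fun x => x)
  have hlen : (PySem.List.sorted A (fun x => x) false).length ≤
      (PySem.List.sorted B (fun x => x) false).length := by
    rw [PySem.List.length_sorted, PySem.List.length_sorted]; exact hpre
  rw [soln_char _ _ 0 hApw hBpw hlen, alt_char _ _ 0 0 (by omega)]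
  simp
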